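-- pv_equiv track=rewrite | github.com/omarPVP123131/Web-Pagina-kitty | x.py | generate_html_element
-- ===== SOURCE A (Python) =====
-- def generate_html_element(tag_name, content, num_times, enumerate_results=False):
--     element_html = ""
--
--     for i in range(num_times):
--         if enumerate_results:
--             element_html += f"<{tag_name} src='/renamed_images/{str(i + 1).zfill(4)}.jpg' alt='{content} {i + 1}'>\n"
--         else:
--             element_html += f"<{tag_name} src='/renamed_images/{content}.jpg' alt='{content}'>\n"
--
--     return element_html
-- ===== SOURCE B (Python) =====
-- def generate_html_element(tag_name, content, num_times, enumerate_results=False):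
--     if enumerate_results:
--         def build(lo, hi):
--             # divide-and-conquer over the index interval [lo, hi)
--             if hi - lo <= 0:
--                 return ""
--             if hi - lo == 1:
--                 i = lo
--                 return f"<{tag_name} src='/renamed_images/{str(i + 1).zfill(4)}.jpg' alt='{content} {i + 1}'>\n"
--             mid = (lo + hi) // 2
--             return build(lo, mid) + build(mid, hi)
--         return build(0, num_times)
--     line = f"<{tag_name} src='/renamed_images/{content}.jpg' alt='{content}'>\n"
--     def rep(s, n):
--         # repetition by doubling (binary decomposition of n)
--         if n <= 0:
--             return ""
--         half = rep(s, n // 2)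
--         return half + half + (s if n % 2 else "")
--     return rep(line, num_times)
-- ===== Notes on version B (the rewrite author's own statement) =====
-- stated objective: alternative
-- what changed: Replaces the linear accumulation loop by recursion: the enumerated branch builds the string by divide-and-conquer over the index interval (split at the midpoint), the constant branch repeats the single line by binary doubling (half = rep(n//2); half+half+odd bit).
import Mathlib
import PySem

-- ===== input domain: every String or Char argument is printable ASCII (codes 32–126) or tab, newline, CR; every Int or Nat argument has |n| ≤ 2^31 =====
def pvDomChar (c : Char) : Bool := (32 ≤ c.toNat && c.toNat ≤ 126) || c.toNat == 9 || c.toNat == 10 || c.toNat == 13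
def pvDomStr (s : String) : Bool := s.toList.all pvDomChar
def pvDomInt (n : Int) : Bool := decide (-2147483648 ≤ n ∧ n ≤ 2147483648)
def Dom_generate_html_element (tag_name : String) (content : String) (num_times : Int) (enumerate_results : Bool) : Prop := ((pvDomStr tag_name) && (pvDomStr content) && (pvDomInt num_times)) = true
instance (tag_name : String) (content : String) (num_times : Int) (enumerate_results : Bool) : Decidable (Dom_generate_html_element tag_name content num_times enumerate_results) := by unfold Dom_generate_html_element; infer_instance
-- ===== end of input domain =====

-- B replaces the linear accumulation loop by recursion: divide-and-conquer over the index
-- interval in the enumerated branch, repetition by binary doubling in the constant branch.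

-- ===== PORT A =====
-- A: one loop over range(num_times), branching on enumerate_results at every iteration,
-- appending one f-string line to the accumulator each time.
def generate_html_element (tag_name : String) (content : String) (num_times : Int) (enumerate_results : Bool) : String :=
  (PySem.List.pyRange 0 num_times 1).foldl
    (fun element_html i =>
      if enumerate_results then
        element_html ++ ("<" ++ tag_name ++ " src='/renamed_images/" ++
          PySem.Str.zfill (PySem.Int.toStr (i + 1)) 4 ++ ".jpg' alt='" ++ content ++ " " ++
          PySem.Int.toStr (i + 1) ++ "'>\n")
      else
        element_html ++ ("<" ++ tag_name ++ " src='/renamed_images/" ++ content ++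
          ".jpg' alt='" ++ content ++ "'>\n"))
    ""

-- ===== PORT B =====
-- B-side helper `build(lo, hi)`: divide-and-conquer over the index interval [lo, hi).
def pvBuild (tag_name : String) (content : String) (lo hi : Int) : String :=
  if _h0 : hi - lo ≤ 0 then ""
  else if _h1 : hi - lo = 1 then
    "<" ++ tag_name ++ " src='/renamed_images/" ++ PySem.Str.zfill (PySem.Int.toStr (lo + 1)) 4 ++
      ".jpg' alt='" ++ content ++ " " ++ PySem.Int.toStr (lo + 1) ++ "'>\n"
  else
    let mid := PySem.Int.floordiv (lo + hi) 2
    pvBuild tag_name content lo mid ++ pvBuild tag_name content mid hi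
termination_by (hi - lo).toNat
decreasing_by
  · have := PySem.Int.floordiv_two_mid_bounds (lo := lo) (hi := hi) (by omega)
    rw [PySem.Int.floordiv_eq_ediv_of_pos (by omega)] at *
    omega
  · have := PySem.Int.floordiv_two_mid_bounds (lo := lo) (hi := hi) (by omega)
    rw [PySem.Int.floordiv_eq_ediv_of_pos (by omega)] at *
    omega

-- B-side helper `rep(s, n)`: repetition by binary doubling.
def pvRep (s : String) (n : Int) : String :=
  if _h : n ≤ 0 then ""
  else
    let half := pvRep s (PySem.Int.floordiv n 2)
    half ++ half ++ (if PySem.Int.mod n 2 ≠ 0 then s else "")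
termination_by n.toNat
decreasing_by
  rw [PySem.Int.floordiv_eq_ediv_of_pos (by omega)]
  omega

-- B: top-level branch, then recursion instead of a loop in each branch.
def generate_html_element_alt (tag_name : String) (content : String) (num_times : Int) (enumerate_results : Bool) : String :=
  if enumerate_results then
    pvBuild tag_name content 0 num_times
  else
    pvRep ("<" ++ tag_name ++ " src='/renamed_images/" ++ content ++ ".jpg' alt='" ++ content ++ "'>\n")
      num_times

-- ===== PRECONDITION & SPEC =====
def Spec_generate_html_element (tag_name : String) (content : String) (num_times : Int) (enumerate_results : Bool) (out : String) : Prop := out = generate_html_element_alt tag_name content num_times enumerate_results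
instance (tag_name : String) (content : String) (num_times : Int) (enumerate_results : Bool) (out : String) : Decidable (Spec_generate_html_element tag_name content num_times enumerate_results out) := by unfold Spec_generate_html_element; infer_instance

-- ===== CLAIM (what is proved, stated in full; the proofs are below) =====
def Claim_equal_generate_html_element : Prop := ∀ (tag_name : String) (content : String) (num_times : Int) (enumerate_results : Bool), Dom_generate_html_element tag_name content num_times enumerate_results → Spec_generate_html_element tag_name content num_times enumerate_results (generate_html_element tag_name content num_times enumerate_results)

-- ===== LEMMAS AND PROOFS =====

-- A's accumulation loop, as an explicit flatten of a map.
theorem pv_foldl_str_append (f : Int → String) (l : List Int) (acc : String) :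
    (l.foldl (fun a x => a ++ f x) acc).toList = acc.toList ++ (l.map (fun x => (f x).toList)).flatten := by
  induction l generalizing acc with
  | nil => simp
  | cons x t ih => simp [List.foldl_cons, ih]

-- B's divide-and-conquer build produces exactly the lines for indices lo..hi-1.
theorem pvBuild_eq (tag_name content : String) (lo hi : Int) :
    (pvBuild tag_name content lo hi).toList =
      ((PySem.List.pyRange lo hi 1).map (fun i =>
        ("<" ++ tag_name ++ " src='/renamed_images/" ++ PySem.Str.zfill (PySem.Int.toStr (i + 1)) 4 ++
          ".jpg' alt='" ++ content ++ " " ++ PySem.Int.toStr (i + 1) ++ "'>\n").toList)).flatten := by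
  rw [pvBuild]
  split_ifs with h0 h1
  · rw [PySem.List.pyRange_one_eq_nil (by omega)]; simp
  · rw [show hi = lo + 1 by omega, PySem.List.pyRange_one_singleton]
    simp
  · have hmid := PySem.Int.floordiv_two_mid_bounds (lo := lo) (hi := hi) (by omega)
    show (pvBuild tag_name content lo _ ++ pvBuild tag_name content _ hi).toList = _
    rw [String.toList_append, pvBuild_eq, pvBuild_eq,
      PySem.List.pyRange_one_append lo (PySem.Int.floordiv (lo + hi) 2) hi hmid.1 hmid.2]
    simp
termination_by (hi - lo).toNat
decreasing_by
  · have := PySem.Int.floordiv_two_mid_bounds (lo := lo) (hi := hi) (by omega)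
    rw [PySem.Int.floordiv_eq_ediv_of_pos (by omega)] at *
    omega
  · have := PySem.Int.floordiv_two_mid_bounds (lo := lo) (hi := hi) (by omega)
    rw [PySem.Int.floordiv_eq_ediv_of_pos (by omega)] at *
    omega

-- B's doubling repetition is n copies of s.
theorem pvRep_eq (s : String) (n : Int) :
    (pvRep s n).toList = (List.replicate n.toNat s.toList).flatten := by
  rw [pvRep]
  split_ifs with h hodd
  · rw [show n.toNat = 0 by omega]; simp
  · show (pvRep s _ ++ pvRep s _ ++ s).toList = _
    rw [PySem.Int.mod_eq_emod_of_pos (by omega)] at hodd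
    rw [String.toList_append, String.toList_append, pvRep_eq,
      PySem.Int.floordiv_eq_ediv_of_pos (by omega)]
    rw [show n.toNat = (n / 2).toNat + ((n / 2).toNat + 1) by omega,
      List.replicate_add, List.replicate_add, List.replicate_succ']
    simp
  · show (pvRep s _ ++ pvRep s _ ++ "").toList = _
    rw [PySem.Int.mod_eq_emod_of_pos (by omega)] at hodd
    rw [String.toList_append, String.toList_append, pvRep_eq,
      PySem.Int.floordiv_eq_ediv_of_pos (by omega)]
    rw [show n.toNat = (n / 2).toNat + (n / 2).toNat by omega, List.replicate_add, List.flatten_append]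
    simp
termination_by n.toNat
decreasing_by
  all_goals rw [PySem.Int.floordiv_eq_ediv_of_pos (by omega)]; omega

-- ===== VERDICT (by name: the statement is the Claim_ definition above) =====
theorem generate_html_element_spec : Claim_equal_generate_html_element := by
  intro tag_name content num_times enumerate_results _
  unfold Spec_generate_html_element generate_html_element generate_html_element_alt
  apply String.toList_inj.mp
  cases enumerate_results with
  | true =>
    simp only [if_true]
    rw [pv_foldl_str_append (fun i => "<" ++ tag_name ++ " src='/renamed_images/" ++
          PySem.Str.zfill (PySem.Int.toStr (i + 1)) 4 ++ ".jpg' alt='" ++ content ++ " " ++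
          PySem.Int.toStr (i + 1) ++ "'>\n"), pvBuild_eq]
    simp
  | false =>
    simp only [Bool.false_eq_true, if_false]
    rw [pv_foldl_str_append (fun _ => "<" ++ tag_name ++ " src='/renamed_images/" ++ content ++
          ".jpg' alt='" ++ content ++ "'>\n"), pvRep_eq]
    simp [List.map_const', PySem.List.length_pyRange_one]
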